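-- pv_equiv track=rewrite | github.com/httk/httk | httk/exe/vasp/setup_formation_energy.py | magnetization_recurse
-- ===== SOURCE A (Python) =====
-- def magnetization_recurse(basemags,dualmags,high,low):
--     if len(dualmags) == 0:
--         return [basemags]
--
--     index = dualmags.pop()
--     basemags[index] = high
--     hi_list = magnetization_recurse(list(basemags),list(dualmags),high,low)
--     basemags[index] = low
--     low_list = magnetization_recurse(list(basemags),list(dualmags),high,low)
--
--     return hi_list + low_list
-- ===== SOURCE B (Python) =====
-- def magnetization_recurse(basemags, dualmags, high, low):
--     # Iterative breadth-first enumeration: start from the base row and, for each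
--     # dual index (last index first, matching A's pop order), replace every row
--     # by its high- and low- variant.  No recursion, arguments are not mutated.
--     rows = [basemags]
--     for index in reversed(dualmags):
--         next_rows = []
--         for r in rows:
--             for v in (high, low):
--                 row = list(r)
--                 row[index] = v
--                 next_rows.append(row)
--         rows = next_rows
--     return rows
-- ===== Notes on version B (the rewrite author's own statement) =====
-- stated objective: alternative
-- what changed: Replaced A's binary recursion (pop last index, recurse on high branch then low branch, concatenate) with an iterative breadth-first loop that keeps a worklist of rows and doubles it per index; B also does not mutate its arguments (A pops dualmags and writes into basemags).
import Mathlib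
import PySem

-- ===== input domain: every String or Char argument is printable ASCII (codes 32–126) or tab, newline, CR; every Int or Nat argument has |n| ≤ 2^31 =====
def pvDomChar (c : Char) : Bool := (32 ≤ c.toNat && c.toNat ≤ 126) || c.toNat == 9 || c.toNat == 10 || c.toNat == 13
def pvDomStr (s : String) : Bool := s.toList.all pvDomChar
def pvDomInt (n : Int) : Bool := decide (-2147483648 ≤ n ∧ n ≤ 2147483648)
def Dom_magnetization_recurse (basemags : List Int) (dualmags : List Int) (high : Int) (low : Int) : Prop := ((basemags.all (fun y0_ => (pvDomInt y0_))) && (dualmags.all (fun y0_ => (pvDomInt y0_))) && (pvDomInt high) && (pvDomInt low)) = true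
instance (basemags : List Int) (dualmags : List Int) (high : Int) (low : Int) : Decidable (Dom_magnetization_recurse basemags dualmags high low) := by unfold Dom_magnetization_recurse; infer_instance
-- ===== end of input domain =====

-- B replaces A's depth-first binary recursion by an iterative breadth-first worklist
-- over the same index order; equivalence is about the RETURN value only (A mutates
-- dualmags via pop() and writes into basemags; B mutates neither argument).

-- ===== PORT A =====
-- literal transliteration of A: pop the last index, set it high, recurse, set it
-- low, recurse, concatenate.  basemags[index] = v is PySem.List.pySetD (exact
-- under Pre_, which excludes the IndexError inputs).
def magnetization_recurse (basemags : List Int) (dualmags : List Int) (high : Int) (low : Int) : List (List Int) :=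
  if h : dualmags.length = 0 then [basemags]
  else
    let index := dualmags.getLast (by intro he; simp [he] at h)
    let rest := dualmags.dropLast
    let hi_list := magnetization_recurse (PySem.List.pySetD basemags index high) rest high low
    let low_list := magnetization_recurse (PySem.List.pySetD basemags index low) rest high low
    hi_list ++ low_list
termination_by dualmags.length
decreasing_by
  all_goals (simp only [List.length_dropLast]; omega)

-- ===== PORT B =====
-- literal transliteration of Source B: fold over reversed(dualmags); each step folds
-- over the current rows, appending the high- and low- variant of every row.
def magnetization_recurse_alt (basemags : List Int) (dualmags : List Int) (high : Int) (low : Int) : List (List Int) :=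
  dualmags.reverse.foldl
    (fun rows index =>
      rows.foldl
        (fun acc r => acc ++ [PySem.List.pySetD r index high, PySem.List.pySetD r index low])
        [])
    [basemags]

-- ===== PRECONDITION & SPEC =====
-- Pre_ excludes exactly the inputs on which Python A raises IndexError:
-- some dual index is out of range for basemags.
def Pre_magnetization_recurse (basemags : List Int) (dualmags : List Int) (high : Int) (low : Int) : Prop :=
  ∀ i ∈ dualmags, PySem.Raise.InRange basemags.length i
instance (basemags : List Int) (dualmags : List Int) (high : Int) (low : Int) : Decidable (Pre_magnetization_recurse basemags dualmags high low) := by unfold Pre_magnetization_recurse; infer_instance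

def pvWitness_magnetization_recurse : List Int × List Int × Int × Int := ([0, 0, 3], [0, 2, -1], 4, -4)

def Spec_magnetization_recurse (basemags : List Int) (dualmags : List Int) (high : Int) (low : Int) (out : List (List Int)) : Prop := out = magnetization_recurse_alt basemags dualmags high low
instance (basemags : List Int) (dualmags : List Int) (high : Int) (low : Int) (out : List (List Int)) : Decidable (Spec_magnetization_recurse basemags dualmags high low out) := by unfold Spec_magnetization_recurse; infer_instance

-- ===== CLAIM (what is proved, stated in full; the proofs are below) =====
def Claim_equal_magnetization_recurse : Prop := ∀ (basemags : List Int) (dualmags : List Int) (high : Int) (low : Int), Dom_magnetization_recurse basemags dualmags high low → Pre_magnetization_recurse basemags dualmags high low → Spec_magnetization_recurse basemags dualmags high low (magnetization_recurse basemags dualmags high low)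

-- ===== LEMMAS AND PROOFS =====

-- Canonical depth-first enumeration over the index list taken MOST-SIGNIFICANT
-- FIRST (i.e. over dualmags.reverse); both ports are proved equal to it.
def pvG (high low : Int) (base : List Int) : List Int → List (List Int)
  | [] => [base]
  | i :: s => pvG high low (PySem.List.pySetD base i high) s ++ pvG high low (PySem.List.pySetD base i low) s

theorem pvA_eq_pvG (high low : Int) (r : List Int) :
    ∀ base, magnetization_recurse base r high low = pvG high low base r.reverse := by
  induction r using List.reverseRecOn with
  | nil => intro base; simp [magnetization_recurse, pvG]
  | append_singleton l a ih =>
    intro base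
    rw [magnetization_recurse]
    simp [pvG, ih]

theorem pvB_foldl_eq_pvG (high low : Int) (s : List Int) :
    ∀ rows : List (List Int),
      s.foldl
        (fun rows index =>
          rows.foldl
            (fun acc r => acc ++ [PySem.List.pySetD r index high, PySem.List.pySetD r index low])
            [])
        rows
      = rows.flatMap (fun r => pvG high low r s) := by
  induction s with
  | nil => intro rows; simp [pvG]
  | cons i s ih =>
    intro rows
    rw [List.foldl_cons, ih,
      PySem.List.foldl_append_eq_flatMap (fun r => [PySem.List.pySetD r i high, PySem.List.pySetD r i low])]
    simp [List.flatMap_assoc, pvG]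

theorem magnetization_recurse_spec : Claim_equal_magnetization_recurse := by
  intro basemags dualmags high low _ _
  unfold Spec_magnetization_recurse magnetization_recurse_alt
  rw [pvB_foldl_eq_pvG, pvA_eq_pvG]
  simp
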